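-- pv_equiv track=rewrite | github.com/kage-kao/tentacles_telegram_bot | config.py | step_indicator
-- ===== SOURCE A (Python) =====
-- def step_indicator(current: int, total: int, text: str) -> str:
--     dots = "\u2501" * 2
--     steps = ""
--     for i in range(1, total + 1):
--         if i < current:
--             steps += "\u2714 "
--         elif i == current:
--             steps += f"\u25B6 "
--         else:
--             steps += "\u25CB "
--     return f"{steps}\n<b>Шаг {current}/{total}:</b> {text}"
-- ===== SOURCE B (Python) =====
-- def step_indicator(current: int, total: int, text: str) -> str:
--     checks = max(0, min(total, current - 1))
--     marker = 1 if 1 <= current <= total else 0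
--     circles = total - checks - marker
--     steps = "\u2714 " * checks + "\u25B6 " * marker + "\u25CB " * circles
--     return f"{steps}\n<b>\u0428\u0430\u0433 {current}/{total}:</b> {text}"
-- ===== Notes on version B (the rewrite author's own statement) =====
-- stated objective: simpler
-- what changed: Replaced the per-index loop with three closed-form counts (checks/marker/circles) and string repetition.
import Mathlib
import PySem

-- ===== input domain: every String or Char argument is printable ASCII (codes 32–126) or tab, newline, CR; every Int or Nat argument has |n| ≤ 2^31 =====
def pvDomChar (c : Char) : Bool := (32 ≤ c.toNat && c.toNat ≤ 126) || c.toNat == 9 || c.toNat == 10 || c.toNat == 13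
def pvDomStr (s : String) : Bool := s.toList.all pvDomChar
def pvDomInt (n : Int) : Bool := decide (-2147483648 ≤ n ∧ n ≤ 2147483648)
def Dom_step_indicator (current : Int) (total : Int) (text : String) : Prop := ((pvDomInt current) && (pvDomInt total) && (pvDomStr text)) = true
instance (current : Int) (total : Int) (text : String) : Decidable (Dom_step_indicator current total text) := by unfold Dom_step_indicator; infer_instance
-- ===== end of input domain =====

-- B replaces A's per-index loop by three closed-form counts and string repetition (objective: simpler).

-- ===== PORT A =====
-- literal transliteration of A: the unused 'dots' binding, the loop over range(1, total+1)
-- accumulating into 'steps', then the f-string.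
def step_indicator (current : Int) (total : Int) (text : String) : String :=
  let _dots : String := String.ofList (PySem.List.pyRepeat "\u2501".toList 2)  -- "━" * 2 (string repetition, exact)
  let steps := (PySem.List.pyRange 1 (total + 1) 1).foldl
    (fun s i =>
      if i < current then s ++ "\u2714 "
      else if i = current then s ++ "\u25B6 "
      else s ++ "\u25CB ") ""
  steps ++ "\n<b>Шаг " ++ PySem.Int.toStr current ++ "/" ++ PySem.Int.toStr total ++ ":</b> " ++ text

-- ===== PORT B =====
-- literal transliteration of Source B; Python's 's * n' string repetition is ported as
-- PySem.List.pyRepeat on the character list (exact: empty for n ≤ 0).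
def step_indicator_alt (current : Int) (total : Int) (text : String) : String :=
  let checks : Int := max 0 (min total (current - 1))
  let marker : Int := if 1 ≤ current ∧ current ≤ total then 1 else 0
  let circles : Int := total - checks - marker
  let steps := String.ofList (PySem.List.pyRepeat "\u2714 ".toList checks
    ++ PySem.List.pyRepeat "\u25B6 ".toList marker
    ++ PySem.List.pyRepeat "\u25CB ".toList circles)
  steps ++ "\n<b>Шаг " ++ PySem.Int.toStr current ++ "/" ++ PySem.Int.toStr total ++ ":</b> " ++ text

-- ===== PRECONDITION & SPEC =====
def Spec_step_indicator (current : Int) (total : Int) (text : String) (out : String) : Prop := out = step_indicator_alt current total text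
instance (current : Int) (total : Int) (text : String) (out : String) : Decidable (Spec_step_indicator current total text out) := by unfold Spec_step_indicator; infer_instance

-- ===== CLAIM (what is proved, stated in full; the proofs are below) =====
def Claim_equal_step_indicator : Prop := ∀ (current : Int) (total : Int) (text : String), Dom_step_indicator current total text → Spec_step_indicator current total text (step_indicator current total text)

-- ===== LEMMAS AND PROOFS =====

-- (List.replicate k l).flatten grows by one block on the right
theorem pvFlatRep_succ {α : Type} (l : List α) (k : Nat) :
    (List.replicate (k + 1) l).flatten = (List.replicate k l).flatten ++ l := by
  rw [List.replicate_succ', List.flatten_append]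
  simp

-- the loop of A, characterised in closed form (on character lists)
theorem pvFold_eq (c : Int) (n : Nat) (init : String) :
    ((PySem.List.pyRange 1 ((n : Int) + 1) 1).foldl
      (fun s i =>
        if i < c then s ++ "\u2714 "
        else if i = c then s ++ "\u25B6 "
        else s ++ "\u25CB ") init).toList
    = init.toList
      ++ (List.replicate (min n (c - 1).toNat) "\u2714 ".toList).flatten
      ++ (List.replicate (if 1 ≤ c ∧ c ≤ (n : Int) then 1 else 0) "\u25B6 ".toList).flatten
      ++ (List.replicate (n - min n (c - 1).toNat - (if 1 ≤ c ∧ c ≤ (n : Int) then 1 else 0))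
            "\u25CB ".toList).flatten := by
  induction n generalizing init with
  | zero =>
      rw [show ((0 : Nat) : Int) + 1 = 1 by norm_num, PySem.List.pyRange_one_eq_nil le_rfl]
      have hif : ¬ (1 ≤ c ∧ c ≤ ((0 : Nat) : Int)) := by push_cast; omega
      rw [if_neg hif]
      simp
  | succ n ih =>
      have hcast : (((n + 1 : Nat)) : Int) + 1 = ((n : Int) + 1) + 1 := by push_cast; ring
      rw [hcast, PySem.List.pyRange_one_succ_right (by omega : (1 : Int) ≤ (n : Int) + 1),
        List.foldl_append, List.foldl_cons, List.foldl_nil]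
      rcases lt_trichotomy ((n : Int) + 1) c with h | h | h
      · -- symbol ✔ : checks grows
        have h1 : min (n + 1) (c - 1).toNat = min n (c - 1).toNat + 1 := by omega
        have h2 : (1 ≤ c ∧ c ≤ ((n + 1 : Nat) : Int)) ↔ (1 ≤ c ∧ c ≤ (n : Int)) := by
          push_cast; omega
        have h3 : n + 1 - min (n + 1) (c - 1).toNat = n - min n (c - 1).toNat := by omega
        have h4 : min n (c - 1).toNat = n := by omega
        have hm' : ¬ (1 ≤ c ∧ c ≤ (n : Int)) := by omega
        have hm1 : ¬ (1 ≤ c ∧ c ≤ ((n + 1 : Nat) : Int)) := by push_cast; omega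
        rw [if_pos h, String.toList_append, ih, if_neg hm', if_neg hm1, h1, h4]
        simp [pvFlatRep_succ, List.append_assoc]
      · -- symbol ▶ : marker appears
        have h1 : min (n + 1) (c - 1).toNat = n := by omega
        have h4 : min n (c - 1).toNat = n := by omega
        have hm0 : ¬ (1 ≤ c ∧ c ≤ (n : Int)) := by omega
        have hm1 : (1 ≤ c ∧ c ≤ ((n + 1 : Nat) : Int)) := by push_cast; omega
        have hlt : ¬ ((n : Int) + 1 < c) := by omega
        rw [if_neg hlt, if_pos h, String.toList_append, ih, h1, h4]
        have hle : ¬ (c ≤ (n : Int)) := by omega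
        have hle1 : c ≤ (n : Int) + 1 := by omega
        simp [hm1, hle, hle1]
      · -- symbol ○ : circles grows
        have hK : min (n + 1) (c - 1).toNat = min n (c - 1).toNat := by omega
        have hm : (1 ≤ c ∧ c ≤ ((n + 1 : Nat) : Int)) ↔ (1 ≤ c ∧ c ≤ (n : Int)) := by
          push_cast; omega
        have hcirc : n + 1 - min n (c - 1).toNat - (if 1 ≤ c ∧ c ≤ (n : Int) then 1 else 0)
            = (n - min n (c - 1).toNat - (if 1 ≤ c ∧ c ≤ (n : Int) then 1 else 0)) + 1 := by
          split_ifs <;> omega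
        have hlt : ¬ ((n : Int) + 1 < c) := by omega
        have hne : ¬ ((n : Int) + 1 = c) := by omega
        rw [if_neg hlt, if_neg hne, String.toList_append, ih, hK]
        simp only [hm, hcirc, pvFlatRep_succ]
        simp [List.append_assoc]

-- ===== VERDICT (by name: the statement is the Claim_ definition above) =====
theorem step_indicator_spec : Claim_equal_step_indicator := by
  intro current total text _
  unfold Spec_step_indicator step_indicator step_indicator_alt
  apply String.toList_inj.mp
  rcases (by omega : 0 ≤ total ∨ total < 0) with ht | ht
  · obtain ⟨n, rfl⟩ : ∃ n : Nat, total = (n : Int) := ⟨total.toNat, by omega⟩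
    simp only [String.toList_append, pvFold_eq current n "", PySem.List.pyRepeat]
    have hchecks : (max 0 (min (n : Int) (current - 1))).toNat = min n (current - 1).toNat := by
      omega
    have hmarker : (if 1 ≤ current ∧ current ≤ (n : Int) then (1:Int) else 0).toNat
        = (if 1 ≤ current ∧ current ≤ (n : Int) then 1 else 0) := by split_ifs <;> rfl
    have hcirc : ((n : Int) - max 0 (min (n : Int) (current - 1))
          - (if 1 ≤ current ∧ current ≤ (n : Int) then (1:Int) else 0)).toNat
        = n - min n (current - 1).toNat - (if 1 ≤ current ∧ current ≤ (n : Int) then 1 else 0) := by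
      split_ifs <;> omega
    simp [hchecks, hmarker, hcirc]
  · have hnil : PySem.List.pyRange 1 (total + 1) 1 = [] :=
      PySem.List.pyRange_one_eq_nil (by omega)
    have hm : ¬ (1 ≤ current ∧ current ≤ total) := by omega
    rw [hnil, if_neg hm]
    have hchecks : (max 0 (min total (current - 1))).toNat = 0 := by omega
    have hcirc2 : (total - max 0 (min total (current - 1))).toNat = 0 := by omega
    simp [hchecks, hcirc2, PySem.List.pyRepeat]
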